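-- pv_equiv track=rewrite | github.com/LFunTech/lfun-team-pipeline | templates/.pipeline/autosteps/build-conflict-detector.py | normalize_selected_builders
-- ===== SOURCE A (Python) =====
-- ORDER = ["dba", "migrator", "backend", "security", "frontend", "translator", "infra"]
--
-- def sort_key(name: str) -> tuple[int, str]:
--     try:
--         return (ORDER.index(name), name)
--     except ValueError:
--         return (len(ORDER), name)
--
-- def normalize_selected_builders(raw: str | None) -> list[str]:
--     if not raw:
--         return []
--     selected = []
--     for item in raw.split(","):
--         name = item.strip().lower()
--         if name and name not in selected:
--             selected.append(name)
--     return sorted(selected, key=sort_key)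
-- ===== SOURCE B (Python) =====
-- ORDER = ["dba", "migrator", "backend", "security", "frontend", "translator", "infra"]
--
-- def normalize_selected_builders(raw):
--     if not raw:
--         return []
--     names = {n for item in raw.split(",") if (n := item.strip().lower())}
--     known = [b for b in ORDER if b in names]
--     unknown = sorted(n for n in names if n not in ORDER)
--     return known + unknown
-- ===== Notes on version B (the rewrite author's own statement) =====
-- stated objective: idiomatic
-- what changed: B drops the sorted(key=(ORDER.index, name)) call entirely: it collects the cleaned names in a set, emits the known builders by walking the fixed ORDER list once, and appends the remaining names sorted alphabetically.
import Mathlib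
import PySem

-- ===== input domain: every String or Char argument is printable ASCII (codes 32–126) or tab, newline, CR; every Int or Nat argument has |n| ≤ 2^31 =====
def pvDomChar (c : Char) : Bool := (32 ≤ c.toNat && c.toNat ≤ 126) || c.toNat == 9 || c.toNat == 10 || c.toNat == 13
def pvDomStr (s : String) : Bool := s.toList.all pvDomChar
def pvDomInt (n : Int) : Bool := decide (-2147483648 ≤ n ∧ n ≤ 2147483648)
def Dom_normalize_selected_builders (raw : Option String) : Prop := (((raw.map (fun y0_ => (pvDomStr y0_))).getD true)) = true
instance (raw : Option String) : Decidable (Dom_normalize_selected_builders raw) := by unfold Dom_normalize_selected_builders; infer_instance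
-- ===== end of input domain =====

-- B replaces A's sorted(..., key=(ORDER.index(name), name)) with a set of names, one pass
-- over the fixed ORDER list for the known builders, and a plain alphabetical sort of the rest
-- (idiomatic; same return value, no speed claim).

-- ===== PORT A =====
def ORDER : List String := ["dba", "migrator", "backend", "security", "frontend", "translator", "infra"]

def sort_key (name : String) : Int × String :=
  -- try: ORDER.index(name) / except ValueError: len(ORDER)
  match PySem.List.index? ORDER name with
  | some k => ((k : Int), name)
  | none => (PySem.List.len ORDER, name)

def normalize_selected_builders (raw : Option String) : List String :=
  match raw with
  | none => []
  | some s =>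
    if s = "" then []  -- 'if not raw' (None handled above)
    else
      let selected := ((PySem.Str.split? s ",").getD []).foldl  -- split? is some: sep "," ≠ ""
        (fun sel item =>
          let name := PySem.Str.lower (PySem.Str.strip item)
          if name ≠ "" ∧ name ∉ sel then sel ++ [name] else sel) []
      PySem.List.sorted2 selected (fun n => (sort_key n).1) (fun n => (sort_key n).2) false

-- ===== PORT B =====
def normalize_selected_builders_alt (raw : Option String) : List String :=
  match raw with
  | none => []
  | some s =>
    if s = "" then []
    else
      let names : PySem.Set String := ((PySem.Str.split? s ",").getD []).foldl
        (fun acc item =>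
          let n := PySem.Str.lower (PySem.Str.strip item)
          if n ≠ "" then PySem.Set.add acc n else acc) PySem.Set.empty
      let known := ORDER.filter (fun b => PySem.Set.contains names b)
      let unknown := PySem.List.sorted (names.filter (fun n => !(ORDER.contains n))) (fun x => x) false
      known ++ unknown

-- ===== PRECONDITION & SPEC =====
def Spec_normalize_selected_builders (raw : Option String) (out : List String) : Prop := out = normalize_selected_builders_alt raw
instance (raw : Option String) (out : List String) : Decidable (Spec_normalize_selected_builders raw out) := by unfold Spec_normalize_selected_builders; infer_instance

-- ===== CLAIM (what is proved, stated in full; the proofs are below) =====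
def Claim_equal_normalize_selected_builders : Prop := ∀ (raw : Option String), Dom_normalize_selected_builders raw → Spec_normalize_selected_builders raw (normalize_selected_builders raw)

-- ===== LEMMAS AND PROOFS =====

-- A's dedup loop and B's set-building loop produce the same list.
lemma step_eq (acc : List String) (x : String) :
    (let name := PySem.Str.lower (PySem.Str.strip x)
     if name ≠ "" ∧ name ∉ acc then acc ++ [name] else acc)
    = (let n := PySem.Str.lower (PySem.Str.strip x)
       if n ≠ "" then PySem.Set.add acc n else acc) := by
  simp only []
  generalize PySem.Str.lower (PySem.Str.strip x) = n
  simp only [PySem.Set.add, PySem.Set.contains]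
  by_cases h1 : n = "" <;> by_cases h2 : n ∈ acc <;> simp [h1, h2]

lemma fold_eq (l : List String) (acc : List String) :
    l.foldl (fun sel item =>
      let name := PySem.Str.lower (PySem.Str.strip item)
      if name ≠ "" ∧ name ∉ sel then sel ++ [name] else sel) acc
    = l.foldl (fun acc item =>
      let n := PySem.Str.lower (PySem.Str.strip item)
      if n ≠ "" then PySem.Set.add acc n else acc) acc := by
  have h : (fun (sel : List String) (item : String) =>
      let name := PySem.Str.lower (PySem.Str.strip item)
      if name ≠ "" ∧ name ∉ sel then sel ++ [name] else sel)
      = (fun (acc : List String) (item : String) =>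
      let n := PySem.Str.lower (PySem.Str.strip item)
      if n ≠ "" then PySem.Set.add acc n else acc) := by
    funext acc x; exact step_eq acc x
  rw [h]

-- A's dedup loop keeps its accumulator duplicate-free.
lemma fold_nodup (l : List String) : ∀ (acc : List String), acc.Nodup →
    (l.foldl (fun sel item =>
      let name := PySem.Str.lower (PySem.Str.strip item)
      if name ≠ "" ∧ name ∉ sel then sel ++ [name] else sel) acc).Nodup := by
  induction l with
  | nil => intro acc h; exact h
  | cons x t ih =>
    intro acc h
    simp only [List.foldl_cons]
    apply ih
    by_cases hc : PySem.Str.lower (PySem.Str.strip x) ≠ "" ∧ PySem.Str.lower (PySem.Str.strip x) ∉ acc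
    · simp only [if_pos hc]
      simp only [List.nodup_append, List.nodup_singleton, true_and]
      refine ⟨h, ?_⟩
      intro a ha b hb
      simp only [List.mem_singleton] at hb
      exact fun he => hc.2 ((hb ▸ he) ▸ ha)
    · simp only [if_neg hc]; exact h

-- sorted2's pairwise comparison coincides with '<' of the lexicographic key n ↦ (k1 n, n).
lemma before_eq (k1 : String → Int) (a b : String) :
    (decide (k1 a < k1 b) || (!decide (k1 b < k1 a) && decide (a < b)))
    = decide (toLex (k1 a, a) < toLex (k1 b, b)) := by
  by_cases h1 : k1 a < k1 b <;> by_cases h2 : k1 b < k1 a <;> by_cases h3 : a < b <;>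
    simp [h1, h2, h3, Prod.Lex.lt_iff] <;> omega

-- sorted(xs, key=lambda n: (k1(n), n)) is a plain sort under the lexicographic key.
lemma sorted2_as_sorted (k1 : String → Int) (xs : List String) :
    PySem.List.sorted2 xs k1 (fun n => n) false
    = PySem.List.sorted xs (fun n => toLex (k1 n, n)) false := by
  unfold PySem.List.sorted2 PySem.List.sorted
  simp only [Bool.false_eq_true, if_false]
  have h : (fun a b => decide (k1 a < k1 b) || (!decide (k1 b < k1 a) && decide (a < b)))
      = (fun a b : String => decide (toLex (k1 a, a) < toLex (k1 b, b))) := by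
    funext a b; exact before_eq k1 a b
  rw [h]

lemma sk_fst_lt (a : String) (h : a ∈ ORDER) : (sort_key a).1 < 7 := by
  simp only [ORDER, List.mem_cons, List.not_mem_nil, or_false] at h
  rcases h with rfl | rfl | rfl | rfl | rfl | rfl | rfl <;> decide

lemma sk_fst_eq (a : String) (h : a ∉ ORDER) : (sort_key a).1 = 7 := by
  unfold sort_key
  have : PySem.List.index? ORDER a = none := by
    cases hi : PySem.List.index? ORDER a with
    | none => rfl
    | some k =>
      obtain ⟨hk, he, -⟩ := PySem.List.getElem_of_index?_eq_some hi
      exact absurd (he ▸ List.getElem_mem hk) h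
  rw [this]
  rfl

lemma key_lt_of_fst {a b : String} (h : (sort_key a).1 < (sort_key b).1) :
    toLex ((sort_key a).1, a) < toLex ((sort_key b).1, b) := Prod.Lex.lt_iff.mpr (Or.inl h)

lemma key_lt_of_snd {a b : String} (h1 : (sort_key a).1 = (sort_key b).1) (h2 : a < b) :
    toLex ((sort_key a).1, a) < toLex ((sort_key b).1, b) := Prod.Lex.lt_iff.mpr (Or.inr ⟨h1, h2⟩)

lemma sk_snd (a : String) : (sort_key a).2 = a := by
  unfold sort_key; cases PySem.List.index? ORDER a <;> rfl

lemma order_nodup : ORDER.Nodup := by decide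

lemma order_pairwise : ORDER.Pairwise (fun a b => (sort_key a).1 < (sort_key b).1) := by decide

-- The heart of the claim: on a duplicate-free list of names, A's single sort with the
-- (ORDER.index, name) key equals B's "ORDER scan ++ alphabetical sort of the rest".
lemma sorted_split (xs : List String) (hnd : xs.Nodup) :
    PySem.List.sorted2 xs (fun n => (sort_key n).1) (fun n => (sort_key n).2) false
    = ORDER.filter (fun b => xs.contains b)
      ++ PySem.List.sorted (xs.filter (fun n => !(ORDER.contains n))) (fun x => x) false := by
  have hk2 : (fun n : String => (sort_key n).2) = (fun n => n) := funext sk_snd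
  rw [hk2, sorted2_as_sorted]
  set known := ORDER.filter (fun b => xs.contains b) with hknown
  set unknown := PySem.List.sorted (xs.filter (fun n => !(ORDER.contains n))) (fun x => x) false with hunknown
  have hunk_perm : unknown.Perm (xs.filter (fun n => !(ORDER.contains n))) :=
    PySem.List.sorted_perm _ _ _
  have hunk_not : ∀ b ∈ unknown, b ∉ ORDER := by
    intro b hb
    have := hunk_perm.mem_iff.mp hb
    simp only [List.mem_filter, Bool.not_eq_eq_eq_not, Bool.not_true, List.contains_eq_mem,
      decide_eq_false_iff_not] at this
    exact this.2
  apply PySem.List.sorted_eq_of_perm_of_pairwise_lt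
  · -- permutation
    have h1 : known.Perm (xs.filter (fun n => ORDER.contains n)) := by
      rw [List.perm_ext_iff_of_nodup (order_nodup.filter _) (hnd.filter _)]
      intro a
      simp [List.mem_filter, and_comm]
    exact (h1.append hunk_perm).trans (List.filter_append_perm _ xs)
  · -- pairwise strictly increasing key
    rw [List.pairwise_append]
    refine ⟨?_, ?_, ?_⟩
    · exact (order_pairwise.filter _).imp (fun h => key_lt_of_fst h)
    · have hle := PySem.List.sorted_pairwise (xs.filter (fun n => !(ORDER.contains n))) (fun x => x)
      have hnd' : unknown.Nodup := hunk_perm.nodup_iff.mpr (hnd.filter _)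
      have hlt : unknown.Pairwise (fun a b : String => a < b) :=
        (hle.and hnd').imp (fun ⟨h1, h2⟩ => lt_of_le_of_ne h1 h2)
      exact hlt.imp_of_mem (fun {a b} ha hb hab => key_lt_of_snd
        (by rw [sk_fst_eq a (hunk_not a ha), sk_fst_eq b (hunk_not b hb)]) hab)
    · intro a ha b hb
      have haO : a ∈ ORDER := (List.mem_filter.mp ha).1
      exact key_lt_of_fst (by rw [sk_fst_eq b (hunk_not b hb)]; exact sk_fst_lt a haO)

-- ===== VERDICT (by name: the statement is the Claim_ definition above) =====
theorem normalize_selected_builders_spec : Claim_equal_normalize_selected_builders := by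
  intro raw _
  unfold Spec_normalize_selected_builders normalize_selected_builders normalize_selected_builders_alt
  cases raw with
  | none => rfl
  | some s =>
    by_cases hs : s = ""
    · simp [hs]
    · simp only [if_neg hs]
      rw [← fold_eq]
      have hnd := fold_nodup ((PySem.Str.split? s ",").getD []) [] List.nodup_nil
      rw [sorted_split _ hnd]
      simp [PySem.Set.contains]
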